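-- pv_equiv track=rewrite | github.com/Serius69/FIDEMPRO-LACTEOS | findempro/simulate/views/simulate_result_view.py | _group_alerts_by_type
-- ===== SOURCE A (Python) =====
-- from typing import Dict, List, Any, Optional
--
-- def _group_alerts_by_type(alerts: List[Dict]) -> Dict[str, List[Dict]]:
--     """Group alerts by type for display"""
--     grouped = {}
--
--     for alert in alerts:
--         alert_type = alert.get('type', 'OTHER')
--         if alert_type not in grouped:
--             grouped[alert_type] = []
--         grouped[alert_type].append(alert)
--
--     # Sort alerts within each group by severity
--     severity_order = {'ERROR': 0, 'WARNING': 1, 'INFO': 2}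
--     for alert_type in grouped:
--         grouped[alert_type].sort(
--             key=lambda x: severity_order.get(x.get('severity', 'INFO'), 3)
--         )
--
--     return grouped
-- ===== SOURCE B (Python) =====
-- def _group_alerts_by_type(alerts):
--     """Group alerts by type for display"""
--     severity_order = {'ERROR': 0, 'WARNING': 1, 'INFO': 2}
--     # seed keys in first-appearance order of the ORIGINAL list
--     grouped = {alert.get('type', 'OTHER'): [] for alert in alerts}
--     # one stable global sort; stability makes each per-type sublist come out
--     # exactly as sorting that group on its own
--     for alert in sorted(alerts, key=lambda x: severity_order.get(x.get('severity', 'INFO'), 3)):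
--         grouped[alert.get('type', 'OTHER')].append(alert)
--     return grouped
-- ===== Notes on version B (the rewrite author's own statement) =====
-- stated objective: alternative
-- what changed: Replaces the per-group in-place sorts with one stable global sort of the whole alert list plus a dict-comprehension pass that seeds group keys in first-appearance order; stability of the sort makes each per-type sublist identical to sorting that group alone.
import Mathlib
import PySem

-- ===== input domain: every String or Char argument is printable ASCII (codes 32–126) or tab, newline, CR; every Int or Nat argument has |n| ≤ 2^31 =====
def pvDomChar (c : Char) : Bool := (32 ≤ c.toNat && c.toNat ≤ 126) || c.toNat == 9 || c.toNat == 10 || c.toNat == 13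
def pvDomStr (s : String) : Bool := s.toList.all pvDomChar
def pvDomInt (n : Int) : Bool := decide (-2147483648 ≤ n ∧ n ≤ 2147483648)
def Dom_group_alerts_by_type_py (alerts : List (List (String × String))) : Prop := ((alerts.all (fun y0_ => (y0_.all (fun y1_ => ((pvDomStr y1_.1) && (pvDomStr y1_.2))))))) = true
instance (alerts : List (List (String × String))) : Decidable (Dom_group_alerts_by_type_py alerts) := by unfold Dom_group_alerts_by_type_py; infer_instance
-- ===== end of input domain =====

-- B replaces A's per-group in-place sorts by one stable global sort plus a key-seeding pass (different decomposition, same cost).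


-- shared helpers: alert.get(k, dflt) (first-match association-list lookup) and the
-- severity key lambda, which both Pythons spell identically
def pvGet (alert : List (String × String)) (k dflt : String) : String :=
  ((alert.find? (fun p => p.1 == k)).map (·.2)).getD dflt

def pvTyp (alert : List (String × String)) : String := pvGet alert "type" "OTHER"

def pvSevOrder : PySem.Dict String Int :=
  PySem.Dict.ofList [("ERROR", 0), ("WARNING", 1), ("INFO", 2)]

def pvSevKey (x : List (String × String)) : Int :=
  pvSevOrder.getD (pvGet x "severity" "INFO") 3

-- ===== PORT A =====
def group_alerts_by_type_py (alerts : List (List (String × String))) : List (String × List (List (String × String))) :=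
  let grouped : PySem.Dict String (List (List (String × String))) :=
    alerts.foldl (fun d alert =>
      let t := pvTyp alert
      let d := if d.contains t then d else d.insert t []
      d.modify t [] (fun v => v ++ [alert])) PySem.Dict.empty
  -- for alert_type in grouped: grouped[alert_type].sort(key=…)
  let grouped :=
    grouped.keys.foldl (fun d t => d.insert t (PySem.List.sorted (d.getD t []) pvSevKey false)) grouped
  grouped.items

-- ===== PORT B =====
def group_alerts_by_type_py_alt (alerts : List (List (String × String))) : List (String × List (List (String × String))) :=
  -- {alert.get('type','OTHER'): [] for alert in alerts}
  let grouped : PySem.Dict String (List (List (String × String))) :=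
    alerts.foldl (fun d alert => d.insert (pvTyp alert) []) PySem.Dict.empty
  -- for alert in sorted(alerts, key=…): grouped[type].append(alert)
  -- (the key is always present, so grouped[t].append(a) is modify t [] (· ++ [a]))
  let grouped :=
    (PySem.List.sorted alerts pvSevKey false).foldl
      (fun d alert => d.modify (pvTyp alert) [] (fun v => v ++ [alert])) grouped
  grouped.items

-- ===== PRECONDITION & SPEC =====
def Spec_group_alerts_by_type_py (alerts : List (List (String × String))) (out : List (String × List (List (String × String)))) : Prop := out = group_alerts_by_type_py_alt alerts
instance (alerts : List (List (String × String))) (out : List (String × List (List (String × String)))) : Decidable (Spec_group_alerts_by_type_py alerts out) := by unfold Spec_group_alerts_by_type_py; infer_instance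

-- ===== CLAIM (what is proved, stated in full; the proofs are below) =====
def Claim_equal_group_alerts_by_type_py : Prop := ∀ (alerts : List (List (String × String))), Dom_group_alerts_by_type_py alerts → Spec_group_alerts_by_type_py alerts (group_alerts_by_type_py alerts)

-- ===== LEMMAS AND PROOFS =====

-- A's "ensure key, then append" body is exactly modify with default []
theorem pvA_body (d : PySem.Dict String (List (List (String × String)))) (a : List (String × String)) :
    (if d.contains (pvTyp a) then d else d.insert (pvTyp a) []).modify (pvTyp a) [] (fun v => v ++ [a])
      = d.modify (pvTyp a) [] (fun v => v ++ [a]) := by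
  by_cases h : d.contains (pvTyp a)
  · simp [h]
  · have h' : d.contains (pvTyp a) = false := by simpa using h
    simp only [h', Bool.false_eq_true, if_false, PySem.Dict.modify,
      PySem.Dict.getD_insert_self, PySem.Dict.insert_insert_self,
      PySem.Dict.getD_of_not_contains d _ h']

-- insertBy prepends when x sorts before everything
theorem pvInsertBy_cons {α : Type} (b : α → α → Bool) (x : α) (l : List α)
    (h : ∀ z ∈ l, b x z = true) : PySem.List.insertBy b x l = x :: l := by
  cases l with
  | nil => rfl
  | cons y ys => simp [PySem.List.insertBy, h y (by simp)]

-- filtering commutes with one stable insertion into a sorted list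
theorem pvFilter_insertBy {α : Type} (key : α → Int) (p : α → Bool) (x : α) (acc : List α)
    (h : acc.Pairwise (fun a b => key a ≤ key b)) :
    (PySem.List.insertBy (fun a b => decide (key a < key b)) x acc).filter p
      = if p x then PySem.List.insertBy (fun a b => decide (key a < key b)) x (acc.filter p)
        else acc.filter p := by
  induction acc with
  | nil => by_cases hp : p x <;> simp [PySem.List.insertBy, hp]
  | cons y ys ih =>
    have hy : ∀ z ∈ ys, key y ≤ key z := (List.pairwise_cons.mp h).1
    have hys : ys.Pairwise (fun a b => key a ≤ key b) := (List.pairwise_cons.mp h).2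
    by_cases hlt : key x < key y
    · have hall : ∀ z ∈ (y :: ys).filter p, decide (key x < key z) = true := by
        intro z hz
        have hz' : z ∈ y :: ys := List.mem_of_mem_filter hz
        rcases List.mem_cons.mp hz' with rfl | hz2
        · simp [hlt]
        · exact decide_eq_true (lt_of_lt_of_le hlt (hy z hz2))
      rw [show PySem.List.insertBy (fun a b => decide (key a < key b)) x (y :: ys)
            = x :: y :: ys by simp [PySem.List.insertBy, hlt]]
      rw [show PySem.List.insertBy (fun a b => decide (key a < key b)) x ((y :: ys).filter p)
            = x :: (y :: ys).filter p from pvInsertBy_cons _ _ _ hall]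
      by_cases hp : p x <;> simp [hp, List.filter_cons]
    · rw [show PySem.List.insertBy (fun a b => decide (key a < key b)) x (y :: ys)
            = y :: PySem.List.insertBy (fun a b => decide (key a < key b)) x ys by
              simp [PySem.List.insertBy, hlt]]
      by_cases hpy : p y
      · simp only [List.filter_cons, hpy, if_pos, ih hys]
        by_cases hp : p x
        · simp only [hp, if_true]
          rw [show PySem.List.insertBy (fun a b => decide (key a < key b)) x (y :: ys.filter p)
                = y :: PySem.List.insertBy (fun a b => decide (key a < key b)) x (ys.filter p) by
                  simp [PySem.List.insertBy, hlt]]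
          try simp [hpy]
        · simp [hp]
      · simp only [List.filter_cons, hpy]
        rw [ih hys]
        simp

theorem pvSorted_append_singleton {α : Type} (key : α → Int) (l : List α) (x : α) :
    PySem.List.sorted (l ++ [x]) key false
      = PySem.List.insertBy (fun a b => decide (key a < key b)) x (PySem.List.sorted l key false) := by
  rw [PySem.List.sorted_eq_foldl_insertBy, PySem.List.sorted_eq_foldl_insertBy, List.foldl_append]
  rfl

-- stability: filtering commutes with the whole sort
theorem pvFilter_sorted {α : Type} (key : α → Int) (p : α → Bool) (xs : List α) :
    PySem.List.sorted (xs.filter p) key false = (PySem.List.sorted xs key false).filter p := by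
  induction xs using List.reverseRecOn with
  | nil => rfl
  | append_singleton l x ih =>
    rw [List.filter_append, pvSorted_append_singleton,
        pvFilter_insertBy key p x _ (PySem.List.sorted_pairwise l key)]
    by_cases hp : p x
    · simp only [hp, if_true, List.filter_cons, List.filter_nil]
      rw [pvSorted_append_singleton, ih]
    · simp [hp, ih]

-- A's grouping loop, simplified to a bare modify-fold
theorem pvGA_eq (alerts : List (List (String × String))) :
    alerts.foldl (fun d alert =>
        let t := pvTyp alert
        let d := if d.contains t then d else d.insert t []
        d.modify t [] (fun v => v ++ [alert])) PySem.Dict.empty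
      = alerts.foldl (fun d a => d.modify (pvTyp a) [] (fun v => v ++ [a])) PySem.Dict.empty := by
  have : (fun (d : PySem.Dict String (List (List (String × String)))) alert =>
      let t := pvTyp alert
      let d := if d.contains t then d else d.insert t []
      d.modify t [] (fun v => v ++ [alert]))
      = fun d a => d.modify (pvTyp a) [] (fun v => v ++ [a]) := by
    funext d a; exact pvA_body d a
  rw [this]

-- getD across a modify-append fold keyed by pvTyp
theorem pvGetD_fold (l : List (List (String × String)))
    (d : PySem.Dict String (List (List (String × String)))) (c : String) :
    (l.foldl (fun d a => d.modify (pvTyp a) [] (fun v => v ++ [a])) d).getD c []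
      = d.getD c [] ++ l.filter (fun a => pvTyp a == c) := by
  have h := PySem.Dict.getD_foldl_modify_append (l.map (fun a => (pvTyp a, a))) d c
  rw [List.foldl_map] at h
  simp only [List.filter_map, List.map_map, Function.comp_def] at h
  simpa using h

-- a fold of inserts of [] keeps every getD _ [] at []
theorem pvSeed_getD (l : List (List (String × String)))
    (d : PySem.Dict String (List (List (String × String)))) (h : ∀ c, d.getD c [] = []) (c : String) :
    (l.foldl (fun d a => d.insert (pvTyp a) []) d).getD c [] = [] := by
  induction l generalizing d with
  | nil => exact h c
  | cons a l ih =>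
    refine ih _ (fun c' => ?_)
    rw [PySem.Dict.getD_insert]
    split <;> simp [h]

-- Set.update by already-present elements is the identity
theorem pvUpdate_eq_self {α : Type} [BEq α] [LawfulBEq α] (s : PySem.Set α) (xs : List α)
    (h : ∀ x ∈ xs, x ∈ s) : PySem.Set.update s xs = s := by
  induction xs generalizing s with
  | nil => rfl
  | cons x xs ih =>
    rw [PySem.Set.update_cons, PySem.Set.add_of_mem (h x (by simp))]
    exact ih s (fun y hy => h y (by simp [hy]))

-- A's per-key sort pass: keys are preserved…
theorem pvSortPass_keys (ks : List String)
    (d : PySem.Dict String (List (List (String × String)))) (h : ∀ k ∈ ks, d.contains k) :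
    (ks.foldl (fun d t => d.insert t (PySem.List.sorted (d.getD t []) pvSevKey false)) d).keys = d.keys := by
  induction ks generalizing d with
  | nil => rfl
  | cons k ks ih =>
    rw [List.foldl_cons, ih, PySem.Dict.keys_insert_of_contains _ _ (h k (by simp))]
    intro k' hk'
    rw [PySem.Dict.contains_insert]
    simp [h k' (List.mem_cons_of_mem _ hk')]

-- …and each value becomes the sort of the old value
theorem pvSortPass_getD (ks : List String) (hnd : ks.Nodup)
    (d : PySem.Dict String (List (List (String × String)))) (c : String) :
    (ks.foldl (fun d t => d.insert t (PySem.List.sorted (d.getD t []) pvSevKey false)) d).getD c []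
      = if c ∈ ks then PySem.List.sorted (d.getD c []) pvSevKey false else d.getD c [] := by
  induction ks generalizing d with
  | nil => simp
  | cons k ks ih =>
    have hk : k ∉ ks := (List.nodup_cons.mp hnd).1
    rw [List.foldl_cons, ih (List.nodup_cons.mp hnd).2]
    by_cases hc : c ∈ ks
    · have hck : c ≠ k := fun h => hk (h ▸ hc)
      simp [hc, PySem.Dict.getD_insert, hck]
    · by_cases hck : c = k
      · subst hck
        simp [hc, PySem.Dict.getD_insert_self]
      · simp [hc, hck, PySem.Dict.getD_insert]

-- ===== VERDICT (by name: the statement is the Claim_ definition above) =====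
theorem group_alerts_by_type_py_spec : Claim_equal_group_alerts_by_type_py := by
  intro alerts _
  unfold Spec_group_alerts_by_type_py group_alerts_by_type_py group_alerts_by_type_py_alt
  simp only []
  rw [pvGA_eq]
  set GA := alerts.foldl (fun d a => d.modify (pvTyp a) [] (fun v => v ++ [a])) PySem.Dict.empty with hGA
  set seed := alerts.foldl (fun d a => d.insert (pvTyp a) []) PySem.Dict.empty with hseed
  set DB := (PySem.List.sorted alerts pvSevKey false).foldl
      (fun d alert => d.modify (pvTyp alert) [] (fun v => v ++ [alert])) seed with hDB
  -- keys
  have hGAkeys : GA.keys = PySem.Set.ofList (alerts.map pvTyp) := by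
    rw [hGA, PySem.Dict.keys_foldl_modify_key alerts pvTyp [] (fun _ a v => v ++ [a]),
        PySem.Dict.keys_empty, PySem.Set.update_nil_left]
  have hSeedkeys : seed.keys = PySem.Set.ofList (alerts.map pvTyp) := by
    rw [hseed, PySem.Dict.keys_foldl_insert_key alerts pvTyp (fun _ _ => []),
        PySem.Dict.keys_empty, PySem.Set.update_nil_left]
  have hDBkeys : DB.keys = seed.keys := by
    rw [hDB, PySem.Dict.keys_foldl_modify_key _ pvTyp [] (fun _ a v => v ++ [a])]
    refine pvUpdate_eq_self _ _ (fun x hx => ?_)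
    rcases List.mem_map.mp hx with ⟨a, ha, rfl⟩
    rw [hSeedkeys]
    exact (PySem.Set.mem_ofList _ _).mpr
      (List.mem_map.mpr ⟨a, (PySem.List.mem_sorted alerts pvSevKey false a).mp ha, rfl⟩)
  have hGAnd : GA.keys.Nodup := by
    rw [hGAkeys]; exact PySem.Set.nodup_ofList _
  have hDBnd : DB.keys.Nodup := by
    rw [hDBkeys, hSeedkeys]; exact PySem.Set.nodup_ofList _
  -- values
  have hGAgetD : ∀ c, GA.getD c [] = alerts.filter (fun a => pvTyp a == c) := by
    intro c; rw [hGA, pvGetD_fold]; simp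
  have hDBgetD : ∀ c, DB.getD c []
      = (PySem.List.sorted alerts pvSevKey false).filter (fun a => pvTyp a == c) := by
    intro c
    rw [hDB, pvGetD_fold, hseed, pvSeed_getD _ _ (fun c' => by simp) c]
    simp
  -- A's sort pass
  have hcontains : ∀ k ∈ GA.keys, GA.contains k := by
    intro k hk
    exact (PySem.Dict.contains_iff_mem_keys _ _).mpr hk
  set SA := GA.keys.foldl (fun d t => d.insert t (PySem.List.sorted (d.getD t []) pvSevKey false)) GA
    with hSA
  have hSAkeys : SA.keys = GA.keys := pvSortPass_keys _ _ hcontains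
  have hSAnd : SA.keys.Nodup := hSAkeys ▸ hGAnd
  rw [PySem.Dict.items_eq_map_keys SA hSAnd [], PySem.Dict.items_eq_map_keys DB hDBnd [],
      hSAkeys, hDBkeys, hSeedkeys, hGAkeys]
  refine List.map_congr_left (fun k hk => ?_)
  have hkmem : k ∈ GA.keys := by rw [hGAkeys]; exact hk
  rw [hSA, pvSortPass_getD GA.keys hGAnd GA k]
  simp only [hkmem, if_true]
  rw [hGAgetD, hDBgetD, pvFilter_sorted]
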